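-- pv_equiv track=rewrite | github.com/Transconnectome/BrainVLM | UMBRELLA/project/training/umbrella_trainer.py | get_turn_distribution
-- ===== SOURCE A (Python) =====
-- from typing import Dict, List, Any, Optional, Tuple, Union
--
-- def get_turn_distribution(conversation: list) -> Dict[str, int]:
--     """
--     Get distribution of turn types in conversation.
--
--     Args:
--         conversation: List of turn dicts
--
--     Returns:
--         Distribution stats
--     """
--     distribution = {
--         "total_turns": len(conversation),
--         "user_turns": 0,
--         "assistant_turns": 0
--     }
--
--     for turn in conversation:
--         role = turn.get("role")
--         if role == "user":
--             distribution["user_turns"] += 1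
--         elif role == "assistant":
--             distribution["assistant_turns"] += 1
--
--     return distribution
-- ===== SOURCE B (Python) =====
-- def get_turn_distribution(conversation: list) -> dict:
--     """Divide-and-conquer tally: split the index range in half, tally the halves
--     recursively, and add the (user, assistant) count pairs."""
--     def tally(lo, hi):
--         # (user, assistant) counts of conversation[lo:hi]
--         if hi - lo == 0:
--             return (0, 0)
--         if hi - lo == 1:
--             role = conversation[lo].get("role")
--             return (1 if role == "user" else 0, 1 if role == "assistant" else 0)
--         mid = (lo + hi) // 2
--         u1, a1 = tally(lo, mid)
--         u2, a2 = tally(mid, hi)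
--         return (u1 + u2, a1 + a2)
--
--     users, assistants = tally(0, len(conversation))
--     return {
--         "total_turns": len(conversation),
--         "user_turns": users,
--         "assistant_turns": assistants,
--     }
-- ===== Notes on version B (the rewrite author's own statement) =====
-- stated objective: alternative
-- what changed: Replaces A's single left-to-right loop that branch-increments two mutable dict counters with a divide-and-conquer recursion over index ranges that tallies each half independently and merges the (user, assistant) count pairs additively.
import Mathlib
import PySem

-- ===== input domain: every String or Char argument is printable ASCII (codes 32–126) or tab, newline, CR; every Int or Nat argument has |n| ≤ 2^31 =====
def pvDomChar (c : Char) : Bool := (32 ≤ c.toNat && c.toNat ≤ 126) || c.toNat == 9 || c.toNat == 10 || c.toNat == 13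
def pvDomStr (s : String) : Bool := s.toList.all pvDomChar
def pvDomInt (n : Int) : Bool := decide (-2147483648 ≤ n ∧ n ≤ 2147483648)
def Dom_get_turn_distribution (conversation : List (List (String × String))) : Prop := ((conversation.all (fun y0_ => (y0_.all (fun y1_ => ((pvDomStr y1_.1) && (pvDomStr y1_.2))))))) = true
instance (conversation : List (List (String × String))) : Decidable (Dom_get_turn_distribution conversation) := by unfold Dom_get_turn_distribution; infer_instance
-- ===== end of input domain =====

-- B replaces A's left-to-right loop incrementing two dict counters with a divide-and-conquer
-- recursion over index ranges that tallies the halves and adds the count pairs (alternative; same O(n)).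

-- ===== PORT A =====
-- literal port: build the three-key dict, then loop, incrementing on "user"/"assistant"
def get_turn_distribution (conversation : List (List (String × String))) : List (String × Int) :=
  let distribution : PySem.Dict String Int :=
    ((PySem.Dict.empty.insert "total_turns" (conversation.length : Int)).insert
        "user_turns" 0).insert "assistant_turns" 0
  let distribution := conversation.foldl (fun d turn =>
    let role := (PySem.Dict.mk turn).get? "role"
    if role = some "user" then d.modify "user_turns" 0 (· + 1)
    else if role = some "assistant" then d.modify "assistant_turns" 0 (· + 1)
    else d) distribution
  distribution.items

-- ===== PORT B =====
-- Source B's tally(lo, hi): (user, assistant) counts of conversation[lo:hi].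
-- conversation[lo] is always in range at the call sites, so '.getD []' is exact there.
def gtdTally (conversation : List (List (String × String))) (lo hi : Nat) : Int × Int :=
  if hi - lo = 0 then (0, 0)
  else if hi - lo = 1 then
    let role := (PySem.Dict.mk ((PySem.List.pyGet? conversation (lo : Int)).getD [])).get? "role"
    ((if role = some "user" then 1 else 0), (if role = some "assistant" then 1 else 0))
  else
    let mid := (lo + hi) / 2
    let p1 := gtdTally conversation lo mid
    let p2 := gtdTally conversation mid hi
    (p1.1 + p2.1, p1.2 + p2.2)
termination_by hi - lo
decreasing_by all_goals omega

def get_turn_distribution_alt (conversation : List (List (String × String))) : List (String × Int) :=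
  let p := gtdTally conversation 0 conversation.length
  [("total_turns", (conversation.length : Int)),
   ("user_turns", p.1),
   ("assistant_turns", p.2)]

-- ===== PRECONDITION & SPEC =====
def Spec_get_turn_distribution (conversation : List (List (String × String))) (out : List (String × Int)) : Prop := out = get_turn_distribution_alt conversation
instance (conversation : List (List (String × String))) (out : List (String × Int)) : Decidable (Spec_get_turn_distribution conversation out) := by unfold Spec_get_turn_distribution; infer_instance

-- ===== CLAIM (what is proved, stated in full; the proofs are below) =====
def Claim_equal_get_turn_distribution : Prop := ∀ (conversation : List (List (String × String))), Dom_get_turn_distribution conversation → Spec_get_turn_distribution conversation (get_turn_distribution conversation)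

-- ===== LEMMAS AND PROOFS =====

-- A's loop over a three-key literal dict: each branch only updates the named value.
theorem gtd_loop_items (conv : List (List (String × String))) :
    ∀ (n u a : Int),
      ((conv.foldl (fun d turn =>
          let role := (PySem.Dict.mk turn).get? "role"
          if role = some "user" then d.modify "user_turns" 0 (· + 1)
          else if role = some "assistant" then d.modify "assistant_turns" 0 (· + 1)
          else d)
        (PySem.Dict.mk [("total_turns", n), ("user_turns", u), ("assistant_turns", a)])).items)
      = [("total_turns", n),
         ("user_turns", u + ((conv.map (fun t => (PySem.Dict.mk t).get? "role")).count (some "user") : Int)),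
         ("assistant_turns", a + ((conv.map (fun t => (PySem.Dict.mk t).get? "role")).count (some "assistant") : Int))] := by
  induction conv with
  | nil => intro n u a; simp
  | cons t ts ih =>
    intro n u a
    simp only [List.foldl_cons]
    by_cases hu : (PySem.Dict.mk t).get? "role" = some "user"
    · rw [if_pos hu]
      have hstep :
        ((PySem.Dict.mk [("total_turns", n), ("user_turns", u), ("assistant_turns", a)]).modify
            "user_turns" 0 (· + 1))
          = PySem.Dict.mk [("total_turns", n), ("user_turns", u + 1), ("assistant_turns", a)] := by
        simp [PySem.Dict.modify, PySem.Dict.contains, PySem.Dict.insert, PySem.Dict.getD,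
          PySem.Dict.get?]
      rw [hstep, ih]
      simp only [List.map_cons, List.count_cons, hu]
      simp
      omega
    · rw [if_neg hu]
      by_cases ha : (PySem.Dict.mk t).get? "role" = some "assistant"
      · rw [if_pos ha]
        have hstep :
          ((PySem.Dict.mk [("total_turns", n), ("user_turns", u), ("assistant_turns", a)]).modify
              "assistant_turns" 0 (· + 1))
            = PySem.Dict.mk [("total_turns", n), ("user_turns", u), ("assistant_turns", a + 1)] := by
          simp [PySem.Dict.modify, PySem.Dict.contains, PySem.Dict.insert, PySem.Dict.getD,
            PySem.Dict.get?]
        rw [hstep, ih]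
        simp only [List.map_cons, List.count_cons, ha]
        simp
        omega
      · rw [if_neg ha, ih]
        simp only [List.map_cons, List.count_cons]
        simp [hu, ha]

-- B's divide-and-conquer tally equals the (user, assistant) role counts over the slice [lo, hi).
theorem gtdTally_counts (conv : List (List (String × String))) :
    ∀ (k lo hi : Nat), hi - lo = k → lo ≤ hi → hi ≤ conv.length →
      gtdTally conv lo hi
        = (((((conv.drop lo).take (hi - lo)).map (fun t => (PySem.Dict.mk t).get? "role")).count (some "user") : Int),
           ((((conv.drop lo).take (hi - lo)).map (fun t => (PySem.Dict.mk t).get? "role")).count (some "assistant") : Int)) := by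
  intro k
  induction k using Nat.strong_induction_on with
  | _ k ih =>
    intro lo hi hk hle hlen
    rw [gtdTally]
    by_cases h0 : hi - lo = 0
    · simp [h0]
    · rw [if_neg h0]
      by_cases h1 : hi - lo = 1
      · rw [if_pos h1]
        have hlt : lo < conv.length := by omega
        have hdrop : conv.drop lo = conv[lo] :: conv.drop (lo + 1) :=
          List.drop_eq_getElem_cons hlt
        have hget : PySem.List.pyGet? conv (lo : Int) = some conv[lo] := by
          rw [PySem.List.pyGet?_natCast]; simp [hlt]
        rw [h1, hdrop, hget]
        simp only [Option.getD_some, List.take_succ_cons, List.take_zero, List.map_cons,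
          List.map_nil, List.count_cons, List.count_nil]
        rw [Prod.mk.injEq]
        constructor <;> (split_ifs <;> simp_all <;> omega)
      · rw [if_neg h1]
        have h2 : 2 ≤ hi - lo := by omega
        set mid := (lo + hi) / 2 with hmid
        have hm1 : lo < mid := by omega
        have hm2 : mid < hi := by omega
        have e1 := ih (mid - lo) (by omega) lo mid rfl (by omega) (by omega)
        have e2 := ih (hi - mid) (by omega) mid hi rfl (by omega) (by omega)
        have hsplit : (conv.drop lo).take (hi - lo)
            = (conv.drop lo).take (mid - lo) ++ (conv.drop mid).take (hi - mid) := by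
          have : hi - lo = (mid - lo) + (hi - mid) := by omega
          rw [this, List.take_add, List.drop_drop]
          have h3 : lo + (mid - lo) = mid := by omega
          rw [h3]
        show ((gtdTally conv lo mid).1 + (gtdTally conv mid hi).1,
              (gtdTally conv lo mid).2 + (gtdTally conv mid hi).2) =
            (((((conv.drop lo).take (hi - lo)).map (fun t => (PySem.Dict.mk t).get? "role")).count (some "user") : Int),
             ((((conv.drop lo).take (hi - lo)).map (fun t => (PySem.Dict.mk t).get? "role")).count (some "assistant") : Int))
        rw [e1, e2, hsplit]
        simp only [List.map_append, List.count_append, Prod.mk.injEq]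
        constructor <;> push_cast <;> ring

-- ===== VERDICT (by name: the statement is the Claim_ definition above) =====
theorem get_turn_distribution_spec : Claim_equal_get_turn_distribution := by
  intro conv _
  show get_turn_distribution conv = get_turn_distribution_alt conv
  unfold get_turn_distribution get_turn_distribution_alt
  have hinit :
      (((PySem.Dict.empty.insert "total_turns" ((conv.length : Int))).insert
          "user_turns" 0).insert "assistant_turns" (0 : Int))
        = PySem.Dict.mk [("total_turns", (conv.length : Int)), ("user_turns", 0), ("assistant_turns", 0)] := by
    simp [PySem.Dict.insert, PySem.Dict.empty, PySem.Dict.contains]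
  rw [gtdTally_counts conv (conv.length - 0) 0 conv.length rfl (by omega) le_rfl]
  simp only [hinit, gtd_loop_items, zero_add, Nat.sub_zero, List.drop_zero, List.take_length]
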